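-- pv_equiv track=rewrite | github.com/sarthaktiwary12/genetic_researcher | agents/tasks/theme_extraction.py | _extract_theme_section
-- ===== SOURCE A (Python) =====
-- def _extract_theme_section(full_text: str, theme_name: str) -> str:
--     """Extract a specific theme section from the full analysis text."""
--     # Look for the theme header in various formats
--     markers = [
--         f"### THEME",
--         f"### {theme_name}",
--         f"## {theme_name}",
--         theme_name.upper(),
--     ]
--
--     lines = full_text.split("\n")
--     start_idx = None
--     end_idx = None
--
--     for i, line in enumerate(lines):
--         if start_idx is None:
--             for marker in markers:
--                 if marker.lower() in line.lower() and theme_name.lower().split()[0] in line.lower():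
--                     start_idx = i
--                     break
--         elif line.startswith("### THEME") or line.startswith("### OVERALL") or line.startswith("## THEME"):
--             if theme_name.lower().split()[0] not in line.lower():
--                 end_idx = i
--                 break
--
--     if start_idx is not None:
--         end_idx = end_idx or len(lines)
--         return "\n".join(lines[start_idx:end_idx])
--
--     return ""
-- ===== SOURCE B (Python) =====
-- def _extract_theme_section(full_text: str, theme_name: str) -> str:
--     """Extract a theme section by first partitioning the lines into chunks cut at every
--     boundary header, then returning the suffix of the first chunk holding a start line."""
--     word = theme_name.lower().split()[0]
--     tl = theme_name.lower()
--     markers = ("### theme", "### " + tl, "## " + tl, tl)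
--
--     def is_boundary(line):
--         return (line.startswith(("### THEME", "### OVERALL", "## THEME"))
--                 and word not in line.lower())
--
--     def is_start(line):
--         ll = line.lower()
--         return word in ll and any(m in ll for m in markers)
--
--     # partition: each boundary line opens a new chunk
--     chunks = []
--     cur = []
--     for line in full_text.split("\n"):
--         if is_boundary(line):
--             chunks.append(cur)
--             cur = [line]
--         else:
--             cur.append(line)
--     chunks.append(cur)
--
--     # a section never crosses a boundary, so it is exactly a chunk suffix
--     for chunk in chunks:
--         for k, line in enumerate(chunk):
--             if is_start(line):
--                 return "\n".join(chunk[k:])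
--     return ""
-- ===== Notes on version B (the rewrite author's own statement) =====
-- stated objective: alternative
-- what changed: A scans once with start_idx/end_idx state and returns an index slice; B uses a partition-then-select algorithm: it first cuts the lines into chunks at every boundary header (a section can never cross a boundary), then returns the suffix of the first chunk containing a start line.
-- outside the precondition, e.g. on _extract_theme_section('x', ' '): A returns '', B raises IndexError
import Mathlib
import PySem

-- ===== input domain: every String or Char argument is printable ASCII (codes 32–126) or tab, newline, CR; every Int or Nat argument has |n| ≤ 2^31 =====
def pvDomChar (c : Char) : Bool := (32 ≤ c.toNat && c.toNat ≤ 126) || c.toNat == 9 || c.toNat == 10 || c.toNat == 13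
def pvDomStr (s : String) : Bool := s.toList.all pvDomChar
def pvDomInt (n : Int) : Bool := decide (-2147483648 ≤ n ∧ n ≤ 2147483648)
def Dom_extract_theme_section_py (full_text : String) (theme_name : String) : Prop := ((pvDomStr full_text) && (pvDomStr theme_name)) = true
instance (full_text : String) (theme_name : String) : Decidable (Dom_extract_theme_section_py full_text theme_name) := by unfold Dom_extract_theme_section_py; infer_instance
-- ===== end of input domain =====

-- B replaces A's single stateful index-tracking scan by a partition-then-select algorithm:
-- the lines are first cut into chunks at every boundary header, then the answer is the suffix
-- of the first chunk that holds a start line; objective: alternative algorithm, same cost.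


-- ===== PORT A =====
-- inner `for marker in markers: if marker.lower() in line.lower() and word in line.lower(): … break`
-- (word = theme_name.lower().split()[0]; the IndexError on a word-less theme_name is excluded by Pre_,
-- the port reads the first word with headD)
def pvMarkerHit : List (List Char) → List Char → List Char → Bool
  | [], _, _ => false
  | m :: ms, word, ll =>
    if PySem.Chars.isIn (PySem.Chars.lower m) ll && PySem.Chars.isIn word ll then true
    else pvMarkerHit ms word ll

-- A's single `for i, line in enumerate(lines)` loop, state = (start_idx, end_idx), break on end
def pvLoopA (markers : List (List Char)) (word : List Char) :
    List (List Char) → Nat → Option Nat → Option Nat × Option Nat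
  | [], _, start => (start, none)
  | line :: rest, i, start =>
    match start with
    | none =>
      if pvMarkerHit markers word (PySem.Chars.lower line) then
        pvLoopA markers word rest (i + 1) (some i)
      else pvLoopA markers word rest (i + 1) none
    | some s =>
      if PySem.Chars.startswith line ("### THEME".toList) ||
         PySem.Chars.startswith line ("### OVERALL".toList) ||
         PySem.Chars.startswith line ("## THEME".toList) then
        if !(PySem.Chars.isIn word (PySem.Chars.lower line)) then (some s, some i)
        else pvLoopA markers word rest (i + 1) (some s)
      else pvLoopA markers word rest (i + 1) (some s)

def extract_theme_section_py (full_text : String) (theme_name : String) : String :=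
  let tn := theme_name.toList
  let markers : List (List Char) :=
    ["### THEME".toList, "### ".toList ++ tn, "## ".toList ++ tn, PySem.Chars.upper tn]
  let lines := PySem.Chars.splitOn full_text.toList ("\n".toList)
  let word := (PySem.Chars.split₀ (PySem.Chars.lower tn)).headD []
  match pvLoopA markers word lines 0 none with
  | (none, _) => ""
  | (some s, e?) =>
    -- `end_idx = end_idx or len(lines)` (Python `or`: None and 0 both fall through to len)
    let e : Nat := match e? with
      | none => lines.length
      | some e => if e = 0 then lines.length else e
    String.ofList (PySem.Chars.join ("\n".toList)
      (PySem.List.slice lines (some (s : Int)) (some (e : Int))))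

-- ===== PORT B =====
-- Source B's `is_boundary(line)`
def pvIsBnd (word : List Char) (line : List Char) : Bool :=
  (PySem.Chars.startswith line ("### THEME".toList) ||
   PySem.Chars.startswith line ("### OVERALL".toList) ||
   PySem.Chars.startswith line ("## THEME".toList)) &&
  !(PySem.Chars.isIn word (PySem.Chars.lower line))

-- Source B's `is_start(line)`
def pvIsStart (word : List Char) (lms : List (List Char)) (line : List Char) : Bool :=
  PySem.Chars.isIn word (PySem.Chars.lower line) &&
  lms.any (fun m => PySem.Chars.isIn m (PySem.Chars.lower line))

-- Source B's partition loop: each boundary line closes `cur` and opens a new chunk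
def pvChunksGo (bnd : List Char → Bool) :
    List (List Char) → List (List (List Char)) → List (List Char) → List (List (List Char))
  | [], acc, cur => acc ++ [cur]
  | l :: rest, acc, cur =>
    if bnd l then pvChunksGo bnd rest (acc ++ [cur]) [l]
    else pvChunksGo bnd rest acc (cur ++ [l])

-- Source B's inner `for k, line in enumerate(chunk): if is_start(line): return chunk[k:]`
-- (chunk[k:] is the running suffix at step k — exact)
def pvFindInChunk (st : List Char → Bool) : List (List Char) → Option (List (List Char))
  | [] => none
  | l :: rest => if st l then some (l :: rest) else pvFindInChunk st rest

-- Source B's outer `for chunk in chunks:` selection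
def pvSelect (st : List Char → Bool) : List (List (List Char)) → Option (List (List Char))
  | [] => none
  | c :: cs =>
    match pvFindInChunk st c with
    | some suf => some suf
    | none => pvSelect st cs

def extract_theme_section_py_alt (full_text : String) (theme_name : String) : String :=
  let tl := PySem.Chars.lower theme_name.toList
  let word := (PySem.Chars.split₀ tl).headD []
  let lms : List (List Char) :=
    ["### theme".toList, "### ".toList ++ tl, "## ".toList ++ tl, tl]
  let lines := PySem.Chars.splitOn full_text.toList ("\n".toList)
  let chunks := pvChunksGo (pvIsBnd word) lines [] []
  match pvSelect (pvIsStart word lms) chunks with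
  | none => ""
  | some suf => String.ofList (PySem.Chars.join ("\n".toList) suf)

-- ===== PRECONDITION & SPEC =====
-- Pre_ excludes theme_name without any non-whitespace word: there A raises IndexError on
-- `theme_name.lower().split()[0]` as soon as a marker matches some line (the empty theme_name is
-- itself a marker that always matches), and only accidentally returns "" when no line matches;
-- B computes the first word up front and raises IndexError on all such theme_names.
def Pre_extract_theme_section_py (full_text : String) (theme_name : String) : Prop :=
  PySem.Chars.split₀ theme_name.toList ≠ []
instance (full_text : String) (theme_name : String) : Decidable (Pre_extract_theme_section_py full_text theme_name) := by unfold Pre_extract_theme_section_py; infer_instance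

def pvWitness_extract_theme_section_py : String × String :=
  ("### THEME 1: Alpha\nbody line\n### THEME 2: Beta\nmore", "Alpha")

def Spec_extract_theme_section_py (full_text : String) (theme_name : String) (out : String) : Prop := out = extract_theme_section_py_alt full_text theme_name
instance (full_text : String) (theme_name : String) (out : String) : Decidable (Spec_extract_theme_section_py full_text theme_name out) := by unfold Spec_extract_theme_section_py; infer_instance

-- ===== CLAIM (what is proved, stated in full; the proofs are below) =====
def Claim_equal_extract_theme_section_py : Prop := ∀ (full_text : String) (theme_name : String), Dom_extract_theme_section_py full_text theme_name → Pre_extract_theme_section_py full_text theme_name → Spec_extract_theme_section_py full_text theme_name (extract_theme_section_py full_text theme_name)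

-- ===== LEMMAS AND PROOFS =====

theorem lowerChar_upperChar (c : Char) :
    PySem.Chars.lowerChar (PySem.Chars.upperChar c) = PySem.Chars.lowerChar c := by
  simp only [PySem.Chars.upperChar, PySem.Chars.lowerChar, PySem.Chars.islower, PySem.Chars.isupper,
    Bool.and_eq_true, decide_eq_true_eq]
  by_cases h : 'a' ≤ c ∧ c ≤ 'z'
  · have h1 : 97 ≤ c.toNat := h.1
    have h2 : c.toNat ≤ 122 := h.2
    have hval : (c.toNat - 32).isValidChar := Or.inl (by omega)
    have hv : (Char.ofNat (c.toNat - 32)).toNat = c.toNat - 32 := by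
      rw [Char.toNat_ofNat, if_pos hval]
    have hA : ('A' ≤ Char.ofNat (c.toNat - 32)) := by
      show (65 : Nat) ≤ (Char.ofNat (c.toNat - 32)).toNat; omega
    have hZ : (Char.ofNat (c.toNat - 32) ≤ 'Z') := by
      show (Char.ofNat (c.toNat - 32)).toNat ≤ (90 : Nat); omega
    have hnc : ¬ ('A' ≤ c ∧ c ≤ 'Z') := by
      rintro ⟨_, hz⟩; have : c.toNat ≤ 90 := hz; omega
    rw [if_pos h, if_pos ⟨hA, hZ⟩, if_neg hnc, hv]
    have e : c.toNat - 32 + 32 = c.toNat := by omega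
    rw [e, Char.ofNat_toNat]
  · rw [if_neg h]

theorem lower_upper_eq_lower (cs : List Char) :
    PySem.Chars.lower (PySem.Chars.upper cs) = PySem.Chars.lower cs := by
  simp [PySem.Chars.lower, PySem.Chars.upper, Function.comp, lowerChar_upperChar]

theorem lower_append (a b : List Char) :
    PySem.Chars.lower (a ++ b) = PySem.Chars.lower a ++ PySem.Chars.lower b := by
  simp [PySem.Chars.lower]

-- the inner marker loop is `any` of the lowered markers, guarded by the word test
theorem markerHit_eq (ms : List (List Char)) (word ll : List Char) :
    pvMarkerHit ms word ll
      = (PySem.Chars.isIn word ll &&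
         ms.any (fun m => PySem.Chars.isIn (PySem.Chars.lower m) ll)) := by
  induction ms with
  | nil => simp [pvMarkerHit]
  | cons m ms ih =>
    simp only [pvMarkerHit, List.any_cons, ih]
    cases PySem.Chars.isIn (PySem.Chars.lower m) ll <;>
      cases PySem.Chars.isIn word ll <;> simp

-- proof-only helpers: A's scan split into an indexed start search and an indexed end search
def pvStartB (word : List Char) (lms : List (List Char)) :
    List (List Char) → Nat → Option Nat
  | [], _ => none
  | line :: rest, i =>
    if pvIsStart word lms line then some i else pvStartB word lms rest (i + 1)

def pvEndB (word : List Char) : List (List Char) → Nat → Option Nat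
  | [], _ => none
  | line :: rest, j =>
    if pvIsBnd word line then some j else pvEndB word rest (j + 1)

-- after the start is found, A's remaining loop is exactly the indexed end search
theorem loopA_some (mk : List (List Char)) (word : List Char) (L : List (List Char)) :
    ∀ j s, pvLoopA mk word L j (some s) = (some s, pvEndB word L j) := by
  induction L with
  | nil => intro j s; rfl
  | cons line rest ih =>
    intro j s
    simp only [pvLoopA, pvEndB, pvIsBnd]
    by_cases hw : PySem.Chars.isIn word (PySem.Chars.lower line) = true
    · simp [hw, ih]
    · have hw' : PySem.Chars.isIn word (PySem.Chars.lower line) = false := by simpa using hw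
      simp only [hw', Bool.not_false, Bool.and_true, eq_self_iff_true, if_true]
      by_cases hbp : (PySem.Chars.startswith line ("### THEME".toList) ||
          PySem.Chars.startswith line ("### OVERALL".toList) ||
          PySem.Chars.startswith line ("## THEME".toList)) = true
      · rw [if_pos hbp, if_pos hbp]
      · rw [if_neg hbp, if_neg hbp, ih]

theorem startB_ge (word : List Char) (lms : List (List Char)) (L : List (List Char)) :
    ∀ i s, pvStartB word lms L i = some s → i ≤ s := by
  induction L with
  | nil => intro i s h; simp [pvStartB] at h
  | cons line rest ih =>
    intro i s h
    simp only [pvStartB] at h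
    split at h
    · cases h; omega
    · have := ih (i + 1) s h; omega

theorem endB_ge (word : List Char) (L : List (List Char)) :
    ∀ j e, pvEndB word L j = some e → j ≤ e := by
  induction L with
  | nil => intro j e h; simp [pvEndB] at h
  | cons line rest ih =>
    intro j e h
    simp only [pvEndB] at h
    split at h
    · cases h; omega
    · have := ih (j + 1) e h; omega

-- A's single scan decomposes into the two indexed searches
theorem loopA_none (mk : List (List Char)) (lms : List (List Char)) (word : List Char)
    (hhit : ∀ line, pvMarkerHit mk word (PySem.Chars.lower line) = pvIsStart word lms line)
    (L : List (List Char)) :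
    ∀ i, pvLoopA mk word L i none
      = (match pvStartB word lms L i with
         | none => (none, none)
         | some s => (some s, pvEndB word (L.drop (s + 1 - i)) (s + 1))) := by
  induction L with
  | nil => intro i; rfl
  | cons line rest ih =>
    intro i
    simp only [pvLoopA, pvStartB, hhit]
    by_cases hc : pvIsStart word lms line = true
    · rw [if_pos hc, if_pos hc, loopA_some]
      simp only []
      have : i + 1 - i = 1 := by omega
      simp [this]
    · rw [if_neg hc, if_neg hc, ih (i + 1)]
      cases hs : pvStartB word lms rest (i + 1) with
      | none => simp
      | some s =>
        have hle := startB_ge word lms rest (i + 1) s hs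
        simp only []
        have h1 : s + 1 - i = (s + 1 - (i + 1)) + 1 := by omega
        rw [h1, List.drop_succ_cons]

-- the indexed start search against the suffix search of B
theorem startB_find (word : List Char) (lms : List (List Char)) :
    ∀ (L : List (List Char)) (i : Nat),
      (pvStartB word lms L i = none → pvFindInChunk (pvIsStart word lms) L = none) ∧
      (∀ s, pvStartB word lms L i = some s →
        i ≤ s ∧ s - i < L.length ∧
        pvFindInChunk (pvIsStart word lms) L = some (L.drop (s - i))) := by
  intro L
  induction L with
  | nil =>
    intro i
    exact ⟨fun _ => rfl, fun s h => by simp [pvStartB] at h⟩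
  | cons l rest ih =>
    intro i
    by_cases hs : pvIsStart word lms l = true
    · refine ⟨fun h => ?_, fun s h => ?_⟩
      · simp [pvStartB, hs] at h
      · simp only [pvStartB, if_pos hs] at h
        cases h
        refine ⟨le_refl _, by simp, ?_⟩
        simp [pvFindInChunk, hs]
    · have heq : pvStartB word lms (l :: rest) i = pvStartB word lms rest (i + 1) := by
        simp [pvStartB, hs]
      have hfe : pvFindInChunk (pvIsStart word lms) (l :: rest)
          = pvFindInChunk (pvIsStart word lms) rest := by
        simp [pvFindInChunk, hs]
      refine ⟨fun h => ?_, fun s h => ?_⟩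
      · rw [hfe]; exact (ih (i + 1)).1 (heq ▸ h)
      · obtain ⟨h1, h2, h3⟩ := (ih (i + 1)).2 s (heq ▸ h)
        refine ⟨by omega, by simp; omega, ?_⟩
        rw [hfe, h3]
        have : s - i = (s - (i + 1)) + 1 := by omega
        rw [this, List.drop_succ_cons]

-- the indexed end search is takeWhile of the non-boundary prefix
theorem endB_take (word : List Char) :
    ∀ (M : List (List Char)) (j : Nat),
      (match pvEndB word M j with
       | none => M
       | some e => M.take (e - j)) = M.takeWhile (fun x => !pvIsBnd word x) := by
  intro M
  induction M with
  | nil => intro j; rfl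
  | cons l M' ih =>
    intro j
    have h2 := ih (j + 1)
    cases hb : pvIsBnd word l with
    | true => simp [pvEndB, hb, List.takeWhile_cons]
    | false =>
      simp only [pvEndB, hb, Bool.false_eq_true, if_false, List.takeWhile_cons,
        Bool.not_false, if_pos]
      cases he : pvEndB word M' (j + 1) with
      | none =>
        rw [he] at h2
        simp only at h2
        simpa using congrArg (List.cons l) h2
      | some e =>
        have hge := endB_ge word M' (j + 1) e he
        rw [he] at h2
        simp only at h2
        simp only
        have hst : e - j = (e - (j + 1)) + 1 := by omega
        rw [hst, List.take_succ_cons, h2]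

theorem select_append (st : List Char → Bool) (a : List (List (List Char))) (c : List (List Char)) :
    pvSelect st (a ++ [c])
      = match pvSelect st a with
        | some suf => some suf
        | none => pvFindInChunk st c := by
  induction a with
  | nil =>
    simp only [List.nil_append, pvSelect]
    cases pvFindInChunk st c <;> rfl
  | cons x xs ih =>
    simp only [List.cons_append, pvSelect, ih]
    cases pvFindInChunk st x <;> simp

theorem findInChunk_append (st : List Char → Bool) (a b : List (List Char)) :
    pvFindInChunk st (a ++ b)
      = match pvFindInChunk st a with
        | some suf => some (suf ++ b)
        | none => pvFindInChunk st b := by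
  induction a with
  | nil => simp [pvFindInChunk]
  | cons l a' ih =>
    by_cases hs : st l = true
    · simp [pvFindInChunk, hs]
    · simp [pvFindInChunk, hs, ih]

-- the heart: selecting from the boundary-cut chunks is the direct suffix search
theorem select_chunks (st : List Char → Bool) (bnd : List Char → Bool)
    (himp : ∀ l, st l = true → bnd l = false) :
    ∀ (L : List (List Char)) (acc : List (List (List Char))) (cur : List (List Char)),
      pvSelect st (pvChunksGo bnd L acc cur)
        = match pvSelect st acc with
          | some suf => some suf
          | none =>
            match pvFindInChunk st cur with
            | some suf => some (suf ++ L.takeWhile (fun l => !bnd l))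
            | none =>
              match pvFindInChunk st L with
              | none => none
              | some suf => some (suf.headD [] :: suf.tail.takeWhile (fun l => !bnd l)) := by
  intro L
  induction L with
  | nil =>
    intro acc cur
    simp only [pvChunksGo, select_append]
    cases pvSelect st acc with
    | some suf => rfl
    | none =>
      simp only [List.takeWhile_nil]
      cases hc : pvFindInChunk st cur with
      | some suf => simp
      | none => simp [pvFindInChunk]
  | cons l L' ih =>
    intro acc cur
    by_cases hb : bnd l = true
    · have hsl : st l = false := by
        cases h : st l
        · rfl
        · rw [himp l h] at hb; exact absurd hb (by simp)
      rw [pvChunksGo, if_pos hb, ih, select_append]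
      cases pvSelect st acc with
      | some suf => rfl
      | none =>
        simp only [List.takeWhile_cons, hb, Bool.not_true, pvFindInChunk, hsl,
          Bool.false_eq_true, if_false]
        cases pvFindInChunk st cur <;> simp
    · have hb' : bnd l = false := by simpa using hb
      rw [pvChunksGo, if_neg hb, ih]
      cases pvSelect st acc with
      | some suf => rfl
      | none =>
        simp only [findInChunk_append, List.takeWhile_cons, hb', Bool.not_false, if_pos]
        cases hc : pvFindInChunk st cur with
        | some suf => simp
        | none =>
          by_cases hs : st l = true
          · simp [pvFindInChunk, hs]
          · simp [pvFindInChunk, hs]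

-- ===== VERDICT (by name: the statement is the Claim_ definition above) =====
set_option maxHeartbeats 1000000 in
theorem extract_theme_section_py_spec : Claim_equal_extract_theme_section_py := by
  intro full_text theme_name _ _
  unfold Spec_extract_theme_section_py extract_theme_section_py extract_theme_section_py_alt
  dsimp only
  set tl := PySem.Chars.lower theme_name.toList with htl
  set word := (PySem.Chars.split₀ tl).headD [] with hword
  set lms : List (List Char) :=
    ["### theme".toList, "### ".toList ++ tl, "## ".toList ++ tl, tl] with hlms
  set lines := PySem.Chars.splitOn full_text.toList ("\n".toList) with hlines
  have hhit : ∀ line, pvMarkerHit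
      ["### THEME".toList, "### ".toList ++ theme_name.toList, "## ".toList ++ theme_name.toList,
        PySem.Chars.upper theme_name.toList] word (PySem.Chars.lower line)
      = pvIsStart word lms line := by
    intro line
    rw [markerHit_eq, pvIsStart]
    simp only [hlms, List.any_cons, List.any_nil, lower_append, lower_upper_eq_lower, htl,
      show PySem.Chars.lower ("### THEME".toList) = "### theme".toList from by decide,
      show PySem.Chars.lower ("### ".toList) = "### ".toList from by decide,
      show PySem.Chars.lower ("## ".toList) = "## ".toList from by decide]
  have himp : ∀ l, pvIsStart word lms l = true → pvIsBnd word l = false := by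
    intro l h
    rw [pvIsStart, Bool.and_eq_true] at h
    rw [pvIsBnd, h.1]
    simp
  rw [loopA_none _ lms word hhit, select_chunks (pvIsStart word lms) (pvIsBnd word) himp]
  simp only [pvSelect, pvFindInChunk]
  cases hstart : pvStartB word lms lines 0 with
  | none =>
    rw [(startB_find word lms lines 0).1 hstart]
  | some s =>
    obtain ⟨-, hlen, hfind⟩ := (startB_find word lms lines 0).2 s hstart
    rw [hfind]
    simp only [Nat.sub_zero] at hlen hfind ⊢
    obtain ⟨l, M, hD⟩ : ∃ l M, lines.drop s = l :: M := by
      cases h : lines.drop s with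
      | nil => exact absurd (List.drop_eq_nil_iff.mp h) (by omega)
      | cons a b => exact ⟨a, b, rfl⟩
    have hM : lines.drop (s + 1) = M := by
      rw [← List.tail_drop, hD, List.tail_cons]
    have hMlen : M.length + 1 = lines.length - s := by
      have := congrArg List.length hD
      simp [List.length_drop] at this
      omega
    rw [hD]
    simp only [List.headD_cons, List.tail_cons]
    have htake := endB_take word M (s + 1)
    rw [hM]
    cases he : pvEndB word M (s + 1) with
    | none =>
      rw [he] at htake
      simp only []
      rw [PySem.List.slice_natCast, ← htake]
      congr 2
      rw [hD]
      have : lines.length - s = M.length + 1 := by omega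
      rw [this]
      simp
    | some e =>
      have hge := endB_ge word M (s + 1) e he
      rw [he] at htake
      simp only []
      rw [if_neg (by omega : ¬ e = 0), PySem.List.slice_natCast, hD, ← htake]
      have : e - s = (e - (s + 1)) + 1 := by omega
      rw [this, List.take_succ_cons]
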